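-- pv_equiv track=rewrite | github.com/amiugete/script_sit_amiu | frequenze.py | long_mese
-- ===== SOURCE A (Python) =====
-- def long_mese(codice_binario):
--     '''
--         Dato un codice binario di 4 numeri dove il primo è la prima settimana, il secondo è la seconda settimana etc.
--             1. restituisce il long dei mesi
--             2. restituisce il conto delle settimane
--     '''
--     #array_giorni=['Lun', 'Mar', 'Mer', 'Gio', 'Ven', 'Sab', 'Dom']
--     long_mesi=''
--     i=0
--     conto_mesi=0
--     while i<4:
--         if codice_binario[i:(i+1)]=='1':
--             conto_mesi+=1
--             if long_mesi=='':
--                 long_mesi='{}'.format((i+1))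
--             else:
--                 long_mesi='{}-{}'.format(long_mesi,i+1)
--         i+=1
--     return long_mesi, conto_mesi
-- ===== SOURCE B (Python) =====
-- _TABLE = [
--     ('', 0), ('1', 1), ('2', 1), ('1-2', 2),
--     ('3', 1), ('1-3', 2), ('2-3', 2), ('1-2-3', 3),
--     ('4', 1), ('1-4', 2), ('2-4', 2), ('1-2-4', 3),
--     ('3-4', 2), ('1-3-4', 3), ('2-3-4', 3), ('1-2-3-4', 4),
-- ]
--
-- def long_mese(codice_binario):
--     mask = sum(1 << i for i, ch in enumerate(codice_binario[:4]) if ch == '1')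
--     return _TABLE[mask]
-- ===== Notes on version B (the rewrite author's own statement) =====
-- stated objective: alternative
-- what changed: Replaces A's accumulating while-loop (incremental string building with an empty-string branch) by a precomputed 16-entry lookup table indexed by the bitmask of the first four characters, so no string is built at call time.
import Mathlib
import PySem

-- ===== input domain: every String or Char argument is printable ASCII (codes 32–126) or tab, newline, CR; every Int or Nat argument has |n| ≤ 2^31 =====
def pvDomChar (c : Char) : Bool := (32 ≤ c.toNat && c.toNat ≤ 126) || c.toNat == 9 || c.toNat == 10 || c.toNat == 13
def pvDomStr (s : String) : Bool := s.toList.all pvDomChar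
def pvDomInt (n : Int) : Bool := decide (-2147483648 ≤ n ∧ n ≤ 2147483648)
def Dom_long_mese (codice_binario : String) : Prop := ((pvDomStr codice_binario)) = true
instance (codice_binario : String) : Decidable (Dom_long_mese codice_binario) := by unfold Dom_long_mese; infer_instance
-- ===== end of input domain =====

-- B replaces A's accumulating while-loop by a precomputed 16-entry table indexed by the bitmask of the first four characters (alternative algorithm: table lookup instead of runtime string building).


-- ===== PORT A =====
-- while i<4 over int i, accumulating (long_mesi, conto_mesi); '{}-{}'.format is concatenation, ported as String.ofList over code points
def long_mese (codice_binario : String) : String × Int :=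
  ([0, 1, 2, 3] : List Int).foldl
    (fun st i =>
      if PySem.Str.slice codice_binario (some i) (some (i + 1)) = "1" then
        let conto : Int := st.2 + 1
        if st.1 = "" then (PySem.Int.toStr (i + 1), conto)
        else (String.ofList (st.1.toList ++ '-' :: (PySem.Int.toStr (i + 1)).toList), conto)
      else st)
    ("", 0)

-- ===== PORT B =====
-- _TABLE (a module-level literal) and: mask = sum(1 << i for i, ch in enumerate(codice_binario[:4]) if ch == '1'); return _TABLE[mask]
def pvTable : List (String × Int) :=
  [("", 0), ("1", 1), ("2", 1), ("1-2", 2),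
   ("3", 1), ("1-3", 2), ("2-3", 2), ("1-2-3", 3),
   ("4", 1), ("1-4", 2), ("2-4", 2), ("1-2-4", 3),
   ("3-4", 2), ("1-3-4", 3), ("2-3-4", 3), ("1-2-3-4", 4)]

def long_mese_alt (codice_binario : String) : String × Int :=
  let mask : Int :=
    (PySem.List.enumerate (PySem.Str.slice codice_binario none (some 4)).toList).foldl
      (fun acc p => if p.2 = '1' then acc + ((1 : Int) <<< p.1.toNat) else acc) 0
  -- mask lies in [0, 16), so _TABLE[mask] never raises in Python; .getD only totalizes the lookup
  (PySem.List.pyGet? pvTable mask).getD ("", 0)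

-- ===== PRECONDITION & SPEC =====
def Spec_long_mese (codice_binario : String) (out : String × Int) : Prop := out = long_mese_alt codice_binario
instance (codice_binario : String) (out : String × Int) : Decidable (Spec_long_mese codice_binario out) := by unfold Spec_long_mese; infer_instance

-- ===== CLAIM (what is proved, stated in full; the proofs are below) =====
def Claim_equal_long_mese : Prop := ∀ (codice_binario : String), Dom_long_mese codice_binario → Spec_long_mese codice_binario (long_mese codice_binario)

-- ===== LEMMAS AND PROOFS =====

-- A's slice test codice_binario[i:i+1] == '1' is 'the i-th character exists and is 1'
theorem pvSlice_one (s : String) (i : Nat) :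
    (PySem.Str.slice s (some (i : Int)) (some ((i : Int) + 1)) = "1") ↔ s.toList[i]? = some '1' := by
  rw [← String.toList_inj]
  have h1 : ((i : Int) + 1) = ((i : Int) + ((1 : Nat) : Int)) := by norm_num
  rw [h1]
  simp only [pysem, PySem.List.slice_natCast_add]
  rw [← List.head?_drop]
  cases h : s.toList.drop i <;> simp_all

-- ===== VERDICT (by name: the statement is the Claim_ definition above) =====
set_option maxHeartbeats 1000000 in
theorem long_mese_spec : Claim_equal_long_mese := by
  intro s _
  unfold Spec_long_mese long_mese long_mese_alt
  have e0 : (PySem.Str.slice s (some 0) (some (0 + 1)) = "1") ↔ s.toList[0]? = some '1' := by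
    simpa using pvSlice_one s 0
  have e1 : (PySem.Str.slice s (some 1) (some (1 + 1)) = "1") ↔ s.toList[1]? = some '1' := by
    simpa using pvSlice_one s 1
  have e2 : (PySem.Str.slice s (some 2) (some (2 + 1)) = "1") ↔ s.toList[2]? = some '1' := by
    simpa using pvSlice_one s 2
  have e3 : (PySem.Str.slice s (some 3) (some (3 + 1)) = "1") ↔ s.toList[3]? = some '1' := by
    simpa using pvSlice_one s 3
  rw [show (PySem.Str.slice s none (some 4)).toList = s.toList.take 4 from by simp [pysem]]
  simp only [List.foldl, e0, e1, e2, e3]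
  have h0 : s.toList[0]? = (s.toList.take 4)[0]? := by simp
  have h1 : s.toList[1]? = (s.toList.take 4)[1]? := by simp
  have h2 : s.toList[2]? = (s.toList.take 4)[2]? := by simp
  have h3 : s.toList[3]? = (s.toList.take 4)[3]? := by simp
  simp only [h0, h1, h2, h3]
  have ht : (s.toList.take 4).length ≤ 4 := by simp
  generalize hg : s.toList.take 4 = t at ht ⊢
  clear h0 h1 h2 h3 e0 e1 e2 e3 hg
  rcases t with _ | ⟨a, _ | ⟨b, _ | ⟨c, _ | ⟨d, _ | ⟨e, t⟩⟩⟩⟩⟩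
  · decide
  · by_cases ha : a = '1' <;> simp [ha] <;> decide
  · by_cases ha : a = '1' <;> by_cases hb : b = '1' <;> simp [ha, hb] <;> decide
  · by_cases ha : a = '1' <;> by_cases hb : b = '1' <;> by_cases hc : c = '1' <;>
      simp [ha, hb, hc] <;> decide
  · by_cases ha : a = '1' <;> by_cases hb : b = '1' <;> by_cases hc : c = '1' <;>
      by_cases hd : d = '1' <;> simp [ha, hb, hc, hd] <;> decide
  · simp at ht; omega
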